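-- pv_equiv track=rewrite | github.com/ankitgoyalgithub/python-recipes | Interview/maximum_length_sequence_one.py | solution
-- ===== SOURCE A (Python) =====
-- def solution(array):
--     previous_zero_index = -1
--     count = 0
--     max_length_sequence = -1
--     max_index = -1
--
--     for idx, i in enumerate(array):
--         if i == 1:
--             count += 1
--         else:
--             count = idx - previous_zero_index
--             previous_zero_index = idx
--
--         if count > max_length_sequence:
--             max_length_sequence = count
--             max_index = previous_zero_index
--
--     return max_index
-- ===== SOURCE B (Python) =====
-- def solution(array):
--     n = len(array)
--     zeros = [i for i, v in enumerate(array) if v != 1]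
--     best_len, best_idx, prev = -1, -1, -1
--     for z, nxt in zip(zeros, zeros[1:] + [n]):
--         length = nxt - prev - 1
--         if length > best_len:
--             best_len, best_idx = length, z
--         prev = z
--     return best_idx
-- ===== Notes on version B (the rewrite author's own statement) =====
-- stated objective: alternative
-- what changed: Replaces A's single element-by-element pass maintaining a running ones-counter and running maximum with a two-phase approach: first build the list of zero positions, then scan consecutive zero-position gaps (prev/next sentinels -1 and len) to pick the earliest zero with the largest window.
import Mathlib
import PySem

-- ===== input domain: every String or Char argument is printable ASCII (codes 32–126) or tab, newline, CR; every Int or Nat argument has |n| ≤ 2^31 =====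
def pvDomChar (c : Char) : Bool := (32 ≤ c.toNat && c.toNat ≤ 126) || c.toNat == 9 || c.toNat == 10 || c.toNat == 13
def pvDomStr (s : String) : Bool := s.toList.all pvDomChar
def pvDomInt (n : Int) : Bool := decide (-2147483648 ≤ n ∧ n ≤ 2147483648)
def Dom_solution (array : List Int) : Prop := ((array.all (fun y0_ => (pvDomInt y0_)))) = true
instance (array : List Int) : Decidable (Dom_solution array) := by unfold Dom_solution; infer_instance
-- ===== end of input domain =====

-- B replaces A's single element-by-element counter pass with a zero-position index list and a gap scan over consecutive zeros (alternative decomposition, same O(n) cost).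

-- ===== PORT A =====
-- 'for idx, i in enumerate(array)' transliterated as index-carrying recursion over the list
def loopA (idx : Int) : List Int → Int × Int × Int × Int → Int × Int × Int × Int
  | [], s => s
  | i :: rest, (prev, count, ml, mi) =>
    let cp := if i = 1 then (count + 1, prev) else (idx - prev, idx)
    let mlmi := if cp.1 > ml then (cp.1, cp.2) else (ml, mi)
    loopA (idx + 1) rest (cp.2, cp.1, mlmi.1, mlmi.2)

def solution (array : List Int) : Int :=
  (loopA 0 array (-1, 0, -1, -1)).2.2.2

-- ===== PORT B =====
-- zeros = [i for i, v in enumerate(array) if v != 1]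
def zerosFrom (idx : Int) : List Int → List Int
  | [] => []
  | v :: rest => if v ≠ 1 then idx :: zerosFrom (idx + 1) rest else zerosFrom (idx + 1) rest

-- 'for z, nxt in zip(zeros, zeros[1:] + [n])': gap scan, state (best_len, best_idx, prev)
def loopB : List (Int × Int) → Int × Int × Int → Int × Int × Int
  | [], s => s
  | (z, nxt) :: rest, (bl, bi, prev) =>
    let length := nxt - prev - 1
    let blbi := if length > bl then (length, z) else (bl, bi)
    loopB rest (blbi.1, blbi.2, z)

def solution_alt (array : List Int) : Int :=
  let n : Int := array.length
  let zeros := zerosFrom 0 array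
  (loopB (List.zip zeros (zeros.tail ++ [n])) (-1, -1, -1)).2.1

-- ===== PRECONDITION & SPEC =====
def Spec_solution (array : List Int) (out : Int) : Prop := out = solution_alt array
instance (array : List Int) (out : Int) : Decidable (Spec_solution array out) := by unfold Spec_solution; infer_instance

-- ===== CLAIM (what is proved, stated in full; the proofs are below) =====
def Claim_equal_solution : Prop := ∀ (array : List Int), Dom_solution array → Spec_solution array (solution array)

-- ===== LEMMAS AND PROOFS =====

-- Main invariant, phase after the first zero of the array: A is mid-window for the
-- last zero seen (prev), whose B-pair (prev, next-zero-or-N) is still pending on the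
-- B side; q is B's stored previous zero, count = n - 1 - q is A's partial window for
-- prev, and A's (ml, mi) are B's pending best folded with the partial window.
lemma loop_inv : ∀ (l : List Int) (n N prev count bl bi q : Int),
    count = n - 1 - q → N = n + l.length →
    (loopA n l (prev, count, (if count > bl then count else bl),
                (if count > bl then prev else bi))).2.2.2
      = (loopB (List.zip (prev :: zerosFrom n l) (zerosFrom n l ++ [N])) (bl, bi, q)).2.1 := by
  intro l
  induction l with
  | nil =>
    intro n N prev count bl bi q hc hN
    have h0 : N = n := by simpa using hN
    simp only [zerosFrom, loopA, loopB, List.zip, List.zipWith, List.nil_append]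
    have h1 : N - q - 1 = count := by omega
    rw [h1]
    split_ifs <;> rfl
  | cons v rest ih =>
    intro n N prev count bl bi q hc hN
    have hN' : N = (n + 1) + rest.length := by
      simp only [List.length_cons] at hN; push_cast at hN ⊢; omega
    by_cases hv : v = 1
    · have hz : zerosFrom n (v :: rest) = zerosFrom (n + 1) rest := by
        simp [zerosFrom, hv]
      rw [hz]
      simp only [loopA, if_pos hv, apply_ite Prod.fst, apply_ite Prod.snd]
      have e1 : (if count + 1 > (if count > bl then count else bl) then count + 1
            else (if count > bl then count else bl))
          = (if count + 1 > bl then count + 1 else bl) := by split_ifs <;> omega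
      have e2 : (if count + 1 > (if count > bl then count else bl) then prev
            else (if count > bl then prev else bi))
          = (if count + 1 > bl then prev else bi) := by split_ifs <;> omega
      rw [e1, e2]
      exact ih (n + 1) N prev (count + 1) bl bi q (by omega) hN'
    · have hz : zerosFrom n (v :: rest) = n :: zerosFrom (n + 1) rest := by
        simp [zerosFrom, hv]
      rw [hz]
      simp only [loopA, loopB, if_neg hv, List.cons_append, List.zip_cons_cons, apply_ite Prod.fst, apply_ite Prod.snd]
      have h1 : n - q - 1 = count := by omega
      rw [h1]
      exact ih (n + 1) N n (n - prev) (if count > bl then count else bl)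
        (if count > bl then prev else bi) prev (by omega) hN'

-- Leading-ones phase: no zero seen yet, B's fold has not started.
lemma phase0 : ∀ (l : List Int) (n N : Int), 0 ≤ n → N = n + l.length →
    (loopA n l (-1, n, (if n = 0 then -1 else n), -1)).2.2.2
      = (loopB (List.zip (zerosFrom n l) ((zerosFrom n l).tail ++ [N])) (-1, -1, -1)).2.1 := by
  intro l
  induction l with
  | nil =>
    intro n N hn hN
    simp [zerosFrom, loopA, loopB]
  | cons v rest ih =>
    intro n N hn hN
    have hN' : N = (n + 1) + rest.length := by
      simp only [List.length_cons] at hN; push_cast at hN ⊢; omega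
    by_cases hv : v = 1
    · have hz : zerosFrom n (v :: rest) = zerosFrom (n + 1) rest := by
        simp [zerosFrom, hv]
      rw [hz]
      simp only [loopA, if_pos hv, apply_ite Prod.fst, apply_ite Prod.snd]
      have e1 : (if n + 1 > (if n = 0 then -1 else n) then n + 1
            else (if n = 0 then -1 else n)) = (if n + 1 = 0 then -1 else n + 1) := by
        split_ifs <;> omega
      have e2 : (if n + 1 > (if n = 0 then -1 else n) then (-1 : Int) else -1) = -1 := by
        split_ifs <;> rfl
      rw [e1, e2]
      exact ih (n + 1) N (by omega) hN'
    · have hz : zerosFrom n (v :: rest) = n :: zerosFrom (n + 1) rest := by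
        simp [zerosFrom, hv]
      rw [hz]
      simp only [loopA, if_neg hv, List.tail_cons, apply_ite Prod.fst, apply_ite Prod.snd]
      have e1 : (if n - -1 > (if n = 0 then -1 else n) then n - -1
            else (if n = 0 then -1 else n)) = (if n + 1 > (-1 : Int) then n + 1 else -1) := by
        split_ifs <;> omega
      have e2 : (if n - -1 > (if n = 0 then -1 else n) then n
            else (-1 : Int)) = (if n + 1 > (-1 : Int) then n else -1) := by
        split_ifs <;> omega
      rw [e1, e2]
      exact loop_inv rest (n + 1) N n (n + 1) (-1) (-1) (-1) (by omega) hN'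

-- ===== VERDICT (by name: the statement is the Claim_ definition above) =====
theorem solution_spec : Claim_equal_solution := by
  intro array _
  unfold Spec_solution solution solution_alt
  have h := phase0 array 0 (array.length) (by omega) (by omega)
  simpa using h
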